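-- pv_equiv track=rewrite | github.com/AkimuneKawa/AtCoder | ABC/ABC192/C.py | g_2
-- ===== SOURCE A (Python) =====
-- def g_2(x):
--     s = [int(c) for c in str(x)]
--     s.sort()
--     ret = ""
--     for i in s:
--         if i != 0:
--             ret += str(i)
--     if ret == "":
--         return 0
--     else:
--         return int(ret)
-- ===== SOURCE B (Python) =====
-- def g_2(x):
--     counts = {}
--     for c in str(x):
--         d = int(c)
--         counts[d] = counts.get(d, 0) + 1
--     out = "".join(str(d) * counts.get(d, 0) for d in range(1, 10))
--     return int(out) if out else 0
-- ===== Notes on version B (the rewrite author's own statement) =====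
-- stated objective: alternative
-- what changed: replaces the sort-then-filter pipeline by a counting pass (a digit histogram dict) followed by an emission pass over digits 1..9, so no comparison sort and no filter occur
import Mathlib
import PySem

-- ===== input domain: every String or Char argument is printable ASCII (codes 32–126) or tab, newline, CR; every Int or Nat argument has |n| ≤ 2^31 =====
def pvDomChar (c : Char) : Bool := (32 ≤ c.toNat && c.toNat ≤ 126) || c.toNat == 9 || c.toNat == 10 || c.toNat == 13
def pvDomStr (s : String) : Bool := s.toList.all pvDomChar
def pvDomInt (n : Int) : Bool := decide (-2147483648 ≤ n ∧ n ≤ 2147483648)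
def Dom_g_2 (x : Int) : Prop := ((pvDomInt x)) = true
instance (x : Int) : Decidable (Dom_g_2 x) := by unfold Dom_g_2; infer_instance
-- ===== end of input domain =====

-- B replaces sort-then-filter by a digit-histogram counting pass plus an emission pass over 1..9 (alternative algorithm, same result).

-- ===== PORT A =====
-- int(c) for a single character c; Pre_ (nonnegative input) guarantees c is a decimal digit, so the
-- ValueError case (none) is unreachable and the getD default is never taken.
def pvIntChar (c : Char) : Int := (PySem.Int.ofChars? [c]).getD 0

def g_2 (x : Int) : Int :=
  let s := (PySem.Int.toChars x).map pvIntChar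
  let s := PySem.List.sorted s (fun i => i) false
  let ret := s.foldl (fun ret i => if i ≠ 0 then ret ++ PySem.Int.toChars i else ret) ([] : List Char)
  if ret = [] then 0 else (PySem.Int.ofChars? ret).getD 0    -- int(ret) cannot fail on a nonempty digit string

-- ===== PORT B =====
def g_2_alt (x : Int) : Int :=
  let counts := (PySem.Int.toChars x).foldl
    (fun d c => d.modify (pvIntChar c) 0 (· + 1)) (PySem.Dict.empty : PySem.Dict Int Int)
  let out := (PySem.List.pyRange 1 10 1).foldl
    (fun acc d => acc ++ (List.replicate (counts.getD d 0).toNat (PySem.Int.toChars d)).flatten)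
    ([] : List Char)   -- str(d) * counts.get(d, 0); the count is never negative, so .toNat is exact
  if out = [] then 0 else (PySem.Int.ofChars? out).getD 0

-- ===== PRECONDITION & SPEC =====
-- Pre_ excludes negative inputs: there str(x) starts with '-' and int('-') raises ValueError in both programs.
def Pre_g_2 (x : Int) : Prop := 0 ≤ x
instance (x : Int) : Decidable (Pre_g_2 x) := by unfold Pre_g_2; infer_instance
def pvWitness_g_2 : Int := (320)
def Spec_g_2 (x : Int) (out : Int) : Prop := out = g_2_alt x
instance (x : Int) (out : Int) : Decidable (Spec_g_2 x out) := by unfold Spec_g_2; infer_instance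

-- ===== CLAIM (what is proved, stated in full; the proofs are below) =====
def Claim_equal_g_2 : Prop := ∀ (x : Int), Dom_g_2 x → Pre_g_2 x → Spec_g_2 x (g_2 x)

-- ===== LEMMAS AND PROOFS =====

/-- The ten decimal digit characters. -/
def pvDigits : List Char := ['0','1','2','3','4','5','6','7','8','9']

lemma mem_toDigitsCore_digit (f : Nat) : ∀ (n : Nat) (acc : List Char),
    ∀ c ∈ Nat.toDigitsCore 10 f n acc, c ∈ acc ∨ c ∈ pvDigits := by
  induction f with
  | zero => intro n acc c hc; exact Or.inl hc
  | succ f ih =>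
    intro n acc c hc
    have hd : Nat.digitChar (n % 10) ∈ pvDigits := by
      have h10 : n % 10 < 10 := Nat.mod_lt _ (by omega)
      interval_cases h : (n % 10) <;> simp [Nat.digitChar, pvDigits]
    rw [Nat.toDigitsCore] at hc
    split at hc
    · rcases List.mem_cons.mp hc with hc | hc
      · exact Or.inr (hc ▸ hd)
      · exact Or.inl hc
    · rcases ih _ _ _ hc with h | h
      · rcases List.mem_cons.mp h with h | h
        · exact Or.inr (h ▸ hd)
        · exact Or.inl h
      · exact Or.inr h

lemma pvIntChar_digit {c : Char} (hc : c ∈ pvDigits) :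
    0 ≤ pvIntChar c ∧ pvIntChar c ≤ 9 := by
  fin_cases hc <;> decide

lemma digits_bounded {x : Int} (hx : 0 ≤ x) :
    ∀ d ∈ (PySem.Int.toChars x).map pvIntChar, 0 ≤ d ∧ d ≤ 9 := by
  intro d hd
  rcases List.mem_map.mp hd with ⟨c, hc, rfl⟩
  have : c ∈ pvDigits := by
    have hx' : ¬ x < 0 := not_lt.mpr hx
    simp only [PySem.Int.toChars, if_neg hx'] at hc
    rcases mem_toDigitsCore_digit _ _ _ _ hc with h | h
    · exact absurd h (List.not_mem_nil)
    · exact h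
  exact pvIntChar_digit this

/-- A's accumulation loop is `acc ++ flatMap toChars (filter (≠ 0))`. -/
lemma foldl_append_if_flatMap (l : List Int) (acc : List Char) :
    l.foldl (fun ret i => if i ≠ 0 then ret ++ PySem.Int.toChars i else ret) acc
      = acc ++ (l.filter (fun i => i ≠ 0)).flatMap PySem.Int.toChars := by
  induction l generalizing acc with
  | nil => simp
  | cons a t ih =>
    rw [List.foldl_cons, ih]
    by_cases h : a = 0
    · simp [h]
    · simp [h]

lemma flatMap_toChars_flatMap (l : List Int) (f : Int → List Int) :
    (l.flatMap f).flatMap PySem.Int.toChars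
      = l.flatMap (fun d => (f d).flatMap PySem.Int.toChars) := by
  induction l with
  | nil => simp
  | cons a t ih => simp [List.flatMap_cons, ih]

/-- The central identity: sorting then dropping zeros equals counting-sort emission over 1..9. -/
lemma sorted_filter_eq_emission (l : List Int) (hl : ∀ d ∈ l, 0 ≤ d ∧ d ≤ 9) :
    (PySem.List.sorted l (fun i => i) false).filter (fun i => i ≠ 0)
      = (PySem.List.pyRange 1 10 1).flatMap (fun d => List.replicate (l.count d) d) := by
  have hrange : PySem.List.pyRange 1 10 1 = [1,2,3,4,5,6,7,8,9] := by decide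
  rw [hrange]
  apply List.Perm.eq_of_pairwise (le := (· ≤ · : Int → Int → Prop))
  · intro a b _ _ h1 h2; exact le_antisymm h1 h2
  · exact (PySem.List.sorted_pairwise l (fun i => i)).filter _
  · -- emission list is ordered: replicates of strictly increasing digits
    rw [List.pairwise_flatMap]
    refine ⟨fun a _ => List.pairwise_replicate.mpr (Or.inr le_rfl), ?_⟩
    have hlt : ([1,2,3,4,5,6,7,8,9] : List Int).Pairwise (· < ·) := by decide
    refine hlt.imp ?_
    intro a b hab x hx y hy
    rw [List.eq_of_mem_replicate hx, List.eq_of_mem_replicate hy]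
    exact le_of_lt hab
  · -- permutation: the two sides count every value alike
    rw [List.perm_iff_count]
    intro v
    have hcs : (PySem.List.sorted l (fun i => i) false).count v = l.count v :=
      (PySem.List.sorted_perm l (fun i => i) false).count_eq v
    by_cases hv0 : v = 0
    · subst hv0
      have : (0 : Int) ∉ (PySem.List.sorted l (fun i => i) false).filter (fun i => i ≠ 0) := by
        intro hmem
        simpa using (List.mem_filter.mp hmem).2
      rw [List.count_eq_zero.mpr this]
      simp [List.count_replicate]
    · rw [List.count_filter (by simpa using hv0), hcs]
      by_cases hv : 1 ≤ v ∧ v ≤ 9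
      · rcases hv with ⟨h1, h9⟩
        simp only [List.count_flatMap]
        interval_cases v <;> simp [List.count_replicate]
      · have h0 : l.count v = 0 := by
          rw [List.count_eq_zero]
          intro hmem
          rcases hl v hmem with ⟨ha, hb⟩
          rcases not_and_or.mp hv with h | h <;> omega
        have hne : ∀ d : Int, 1 ≤ d → d ≤ 9 → (d == v) = false := by
          intro d ha hb
          simp only [beq_eq_false_iff_ne, ne_eq]
          rintro rfl
          rcases not_and_or.mp hv with h | h <;> omega
        simp [List.count_replicate, hne, h0]

-- ===== VERDICT (by name: the statement is the Claim_ definition above) =====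
theorem g_2_spec : Claim_equal_g_2 := by
  intro x _ hx
  unfold Spec_g_2 g_2 g_2_alt
  simp only []
  set l := (PySem.Int.toChars x).map pvIntChar with hldef
  have hl : ∀ d ∈ l, 0 ≤ d ∧ d ≤ 9 := digits_bounded hx
  -- B's counter dict holds exactly the digit counts of l
  have hcount : ∀ d : Int,
      (((PySem.Int.toChars x).foldl
        (fun dd c => dd.modify (pvIntChar c) 0 (· + 1)) (PySem.Dict.empty : PySem.Dict Int Int)).getD d 0)
        = (l.count d : Int) := by
    intro d
    have hfm := List.foldl_map (f := pvIntChar)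
      (g := fun (dd : PySem.Dict Int Int) (v : Int) => dd.modify v 0 (· + 1))
      (l := PySem.Int.toChars x) (init := (PySem.Dict.empty : PySem.Dict Int Int))
    rw [hldef, ← hfm, PySem.Dict.getD_foldl_modify_add_one]
    simp
  -- both programs build the same character list
  have hmain :
      (PySem.List.sorted l (fun i => i) false).foldl
          (fun ret i => if i ≠ 0 then ret ++ PySem.Int.toChars i else ret) ([] : List Char)
        = (PySem.List.pyRange 1 10 1).foldl
            (fun acc d => acc ++ (List.replicate
              ((((PySem.Int.toChars x).foldl
                (fun dd c => dd.modify (pvIntChar c) 0 (· + 1)) (PySem.Dict.empty : PySem.Dict Int Int)).getD d 0).toNat)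
              (PySem.Int.toChars d)).flatten) ([] : List Char) := by
    rw [foldl_append_if_flatMap, PySem.List.foldl_append_eq_flatMap, List.nil_append, List.nil_append]
    rw [sorted_filter_eq_emission l hl, flatMap_toChars_flatMap]
    apply List.flatMap_congr  -- pointwise equality of the emitted blocks
    intro d _
    rw [hcount d, Int.toNat_natCast, List.flatMap_replicate]
  rw [hmain]
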